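-- pv_equiv track=rewrite | github.com/mpaguilar/resume_editor | resume_editor/app/api/routes/route_logic/resume_ai_logic_extraction.py | _update_banner_in_raw_personal
-- ===== SOURCE A (Python) =====
-- def _rebuild_personal_section(
--     lines: list[str],
--     introduction: str,
--     banner_found: bool,
-- ) -> list[str]:
--     """Rebuild personal section with updated banner."""
--     if not banner_found:
--         new_lines = list(lines)
--         if new_lines and new_lines[-1].strip():
--             new_lines.append("")
--         new_lines.extend(["## Banner", "", introduction, ""])
--         return new_lines
--
--     return lines
--
-- def _is_section_header(line: str) -> bool:
--     """Check if line is any section header."""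
--     stripped = line.strip()
--     return stripped.startswith("## ") or stripped.startswith("# ")
--
-- def _skip_banner_content(lines: list[str], start_index: int) -> int:
--     """Skip lines until next section header, return new index."""
--     i = start_index
--     while i < len(lines):
--         if _is_section_header(lines[i]):
--             return i - 1
--         i += 1
--     return i
--
-- def _update_banner_in_raw_personal(raw_personal: str, introduction: str | None) -> str:
--     """Update the Banner subsection in a raw Personal section string."""
--     if not introduction or not introduction.strip():
--         return raw_personal
--
--     stripped_intro = introduction.strip()
--     lines = raw_personal.splitlines()
--     new_lines = []
--     banner_found = False
--
--     i = 0
--     while i < len(lines):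
--         line = lines[i]
--         stripped = line.strip()
--
--         if stripped.lower().startswith("## banner"):
--             banner_found = True
--             new_lines.extend(["## Banner", "", stripped_intro, ""])
--             i = _skip_banner_content(lines, i + 1)
--         else:
--             new_lines.append(line)
--         i += 1
--
--     result_lines = _rebuild_personal_section(new_lines, stripped_intro, banner_found)
--     result = "\n".join(result_lines)
--     if result and not result.endswith("\n"):
--         result += "\n"
--     return result
-- ===== SOURCE B (Python) =====
-- def _starts_section(line: str) -> bool:
--     s = line.strip()
--     return s.startswith("## ") or s.startswith("# ")
--
--
-- def _update_banner_in_raw_personal(raw_personal: str, introduction: str | None) -> str: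
--     """Update the Banner subsection in a raw Personal section string."""
--     if not introduction or not introduction.strip():
--         return raw_personal
--
--     stripped_intro = introduction.strip()
--     banner_block = ["## Banner", "", stripped_intro, ""]
--
--     # Partition the lines into a preamble plus one group per section header.
--     sections = []
--     current = []
--     for line in raw_personal.splitlines():
--         if _starts_section(line):
--             sections.append(current)
--             current = [line]
--         else:
--             current.append(line)
--     sections.append(current)
--
--     # Replace every Banner section's lines with the banner block; keep the rest.
--     banner_found = False
--     new_lines = []
--     for sec in sections:
--         if sec and sec[0].strip().lower().startswith("## banner"):
--             banner_found = True
--             new_lines.extend(banner_block)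
--         else:
--             new_lines.extend(sec)
--
--     if not banner_found:
--         if new_lines and new_lines[-1].strip():
--             new_lines.append("")
--         new_lines.extend(banner_block)
--
--     result = "\n".join(new_lines)
--     if result and not result.endswith("\n"):
--         result += "\n"
--     return result
-- ===== Notes on version B (the rewrite author's own statement) =====
-- stated objective: alternative
-- what changed: A's inline index walk with a scan-and-skip helper (_skip_banner_content) is replaced by a two-phase pass: a fold that partitions the lines into a preamble plus header-started sections, then a fold over the sections replacing every Banner-headed section's lines with the banner block and keeping the others verbatim.
import Mathlib
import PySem

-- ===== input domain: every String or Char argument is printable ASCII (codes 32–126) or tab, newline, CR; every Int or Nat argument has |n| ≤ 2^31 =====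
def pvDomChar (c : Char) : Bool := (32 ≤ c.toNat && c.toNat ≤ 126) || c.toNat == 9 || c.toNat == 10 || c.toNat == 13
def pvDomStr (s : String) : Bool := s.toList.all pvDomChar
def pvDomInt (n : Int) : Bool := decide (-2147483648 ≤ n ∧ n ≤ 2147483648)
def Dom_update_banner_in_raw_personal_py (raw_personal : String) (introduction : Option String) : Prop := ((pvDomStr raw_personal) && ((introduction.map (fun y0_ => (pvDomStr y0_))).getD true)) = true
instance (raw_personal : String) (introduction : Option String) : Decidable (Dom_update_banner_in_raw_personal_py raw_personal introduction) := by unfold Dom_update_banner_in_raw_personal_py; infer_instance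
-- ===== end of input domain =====

-- B replaces A's index-based scan-and-skip walk by a partition-into-sections fold followed by a
-- fold over the sections (same cost, different decomposition; objective: alternative).

-- ===== PORT A =====
-- _is_section_header
def isSectionHeaderA (line : String) : Bool :=
  PySem.Str.startswith (PySem.Str.strip line) "## " ||
    PySem.Str.startswith (PySem.Str.strip line) "# "

-- _skip_banner_content: while-loop on the index i
def skipBannerA (lines : List String) (i : Nat) : Nat :=
  if h : i < lines.length then
    if isSectionHeaderA lines[i] then i - 1
    else skipBannerA lines (i + 1)
  else i
termination_by lines.length - i

theorem skipBannerA_ge (lines : List String) (i : Nat) : i - 1 ≤ skipBannerA lines i := by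
  unfold skipBannerA
  split
  · split
    · omega
    · have := skipBannerA_ge lines (i + 1); omega
  · omega
termination_by lines.length - i

-- the main while-loop of _update_banner_in_raw_personal (state: i, new_lines, banner_found)
def loopA (lines : List String) (intro : String) (i : Nat)
    (new_lines : List String) (banner_found : Bool) : List String × Bool :=
  if h : i < lines.length then
    if PySem.Str.startswith (PySem.Str.lower (PySem.Str.strip lines[i])) "## banner" then
      loopA lines intro (skipBannerA lines (i + 1) + 1)
        (new_lines ++ ["## Banner", "", intro, ""]) true
    else
      loopA lines intro (i + 1) (new_lines ++ [lines[i]]) banner_found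
  else (new_lines, banner_found)
termination_by lines.length - i
decreasing_by
  · have := skipBannerA_ge lines (i + 1); omega
  · omega

-- _rebuild_personal_section
def rebuildA (lines : List String) (intro : String) (banner_found : Bool) : List String :=
  if banner_found = false then
    if lines ≠ [] ∧ PySem.Str.strip (PySem.List.pyGetD lines (-1) "") ≠ "" then
      (lines ++ [""]) ++ ["## Banner", "", intro, ""]
    else
      lines ++ ["## Banner", "", intro, ""]
  else lines

def update_banner_in_raw_personal_py (raw_personal : String) (introduction : Option String) : String :=
  match introduction with
  | none => raw_personal
  | some intro =>
    if intro = "" || PySem.Str.strip intro = "" then raw_personal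
    else
      let stripped_intro := PySem.Str.strip intro
      let lines := PySem.Str.splitlines raw_personal
      let r := loopA lines stripped_intro 0 [] false
      let result := PySem.Str.join "\n" (rebuildA r.1 stripped_intro r.2)
      if result ≠ "" ∧ PySem.Str.endswith result "\n" = false then result ++ "\n" else result

-- ===== PORT B =====
-- _starts_section
def sectionStartB (line : String) : Bool :=
  PySem.Str.startswith (PySem.Str.strip line) "## " ||
    PySem.Str.startswith (PySem.Str.strip line) "# "

-- fold step partitioning the lines into sections (state: finished sections, current section)
def splitStepB (st : List (List String) × List String) (line : String) :
    List (List String) × List String :=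
  if sectionStartB line then (st.1 ++ [st.2], [line]) else (st.1, st.2 ++ [line])

-- "sec and sec[0].strip().lower().startswith('## banner')"
def isBannerSecB (sec : List String) : Bool :=
  match sec with
  | [] => false
  | l :: _ => PySem.Str.startswith (PySem.Str.lower (PySem.Str.strip l)) "## banner"

-- fold step transforming the sections (state: banner_found, new_lines)
def procStepB (block : List String) (st : Bool × List String) (sec : List String) :
    Bool × List String :=
  if isBannerSecB sec then (true, st.2 ++ block) else (st.1, st.2 ++ sec)

def update_banner_in_raw_personal_py_alt (raw_personal : String) (introduction : Option String) : String :=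
  match introduction with
  | none => raw_personal
  | some intro =>
    if intro = "" || PySem.Str.strip intro = "" then raw_personal
    else
      let stripped_intro := PySem.Str.strip intro
      let block := ["## Banner", "", stripped_intro, ""]
      let st := (PySem.Str.splitlines raw_personal).foldl splitStepB ([], [])
      let res := (st.1 ++ [st.2]).foldl (procStepB block) (false, [])
      let new_lines :=
        if res.1 = false then
          if res.2 ≠ [] ∧ PySem.Str.strip (PySem.List.pyGetD res.2 (-1) "") ≠ "" then
            (res.2 ++ [""]) ++ block
          else res.2 ++ block
        else res.2
      let result := PySem.Str.join "\n" new_lines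
      if result ≠ "" ∧ PySem.Str.endswith result "\n" = false then result ++ "\n" else result

-- ===== PRECONDITION & SPEC =====
def Spec_update_banner_in_raw_personal_py (raw_personal : String) (introduction : Option String) (out : String) : Prop := out = update_banner_in_raw_personal_py_alt raw_personal introduction
instance (raw_personal : String) (introduction : Option String) (out : String) : Decidable (Spec_update_banner_in_raw_personal_py raw_personal introduction out) := by unfold Spec_update_banner_in_raw_personal_py; infer_instance

-- ===== CLAIM (what is proved, stated in full; the proofs are below) =====
def Claim_equal_update_banner_in_raw_personal_py : Prop := ∀ (raw_personal : String) (introduction : Option String), Dom_update_banner_in_raw_personal_py raw_personal introduction → Spec_update_banner_in_raw_personal_py raw_personal introduction (update_banner_in_raw_personal_py raw_personal introduction)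

-- ===== LEMMAS AND PROOFS =====

-- abbreviation for the banner test, shared by the proofs
def isBannerLine (l : String) : Bool :=
  PySem.Str.startswith (PySem.Str.lower (PySem.Str.strip l)) "## banner"

-- common recursive reference shape of the scan: sections are consumed one at a time
def goL (intro : String) (xs : List String) : List String × Bool :=
  match xs with
  | [] => ([], false)
  | l :: rest =>
    if isBannerLine l then
      (["## Banner", "", intro, ""] ++
        (goL intro (rest.dropWhile (fun x => !isSectionHeaderA x))).1, true)
    else
      (l :: (goL intro rest).1, (goL intro rest).2)
termination_by xs.length
decreasing_by
  · have := List.length_dropWhile_le (fun x => !isSectionHeaderA x) rest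
    simp; omega
  · simp

theorem goL_nil (intro : String) : goL intro [] = ([], false) := by
  rw [goL.eq_def]

theorem goL_cons_banner (intro l : String) (rest : List String) (hb : isBannerLine l = true) :
    goL intro (l :: rest) =
      (["## Banner", "", intro, ""] ++
        (goL intro (rest.dropWhile (fun x => !isSectionHeaderA x))).1, true) := by
  rw [goL.eq_def]
  simp [hb]

theorem goL_cons_not (intro l : String) (rest : List String) (hb : isBannerLine l = false) :
    goL intro (l :: rest) = (l :: (goL intro rest).1, (goL intro rest).2) := by
  rw [goL.eq_def]
  simp [hb]

-- recursive reference shape of B's partitioning fold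
def splitRecB (cur : List String) (xs : List String) : List (List String) :=
  match xs with
  | [] => [cur]
  | l :: rest =>
    if isSectionHeaderA l then cur :: splitRecB [l] rest else splitRecB (cur ++ [l]) rest

-- a char that lower maps to a non-lowercase-letter code was that char already
theorem lowerChar_eq_nonletter (c d : Char) (hd : d.toNat < 97 ∨ 122 < d.toNat)
    (h : PySem.Chars.lowerChar c = d) : c = d := by
  unfold PySem.Chars.lowerChar at h
  split at h
  · exfalso
    rename_i hc
    unfold PySem.Chars.isupper at hc
    simp only [Bool.and_eq_true, decide_eq_true_eq] at hc
    obtain ⟨h1, h2⟩ := hc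
    rw [Char.le_def, UInt32.le_iff_toNat_le] at h1 h2
    have hA : ('A' : Char).val.toNat = 65 := by decide
    have hZ : ('Z' : Char).val.toNat = 90 := by decide
    have hct : c.toNat = c.val.toNat := rfl
    have hv : (Char.ofNat (c.toNat + 32)).toNat = c.toNat + 32 := by
      rw [Char.toNat_ofNat, if_pos]
      unfold Nat.isValidChar
      left
      omega
    have hdt : d.toNat = c.toNat + 32 := by rw [← h, hv]
    omega
  · exact h

-- the "## banner" test implies the "## " prefix, on the char-list level
theorem banner_chars (cs : List Char)
    (h : PySem.Chars.startswith (PySem.Chars.lower cs) ("## banner".toList) = true) :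
    PySem.Chars.startswith cs ("## ".toList) = true := by
  rw [PySem.Chars.startswith_iff] at h ⊢
  obtain ⟨t, ht⟩ := h
  unfold PySem.Chars.lower at ht
  have hban : ("## banner".toList) = ['#', '#', ' ', 'b', 'a', 'n', 'n', 'e', 'r'] := rfl
  have hsp : ("## ".toList) = ['#', '#', ' '] := rfl
  rw [hban] at ht
  rw [hsp]
  cases cs with
  | nil => simp at ht
  | cons a cs1 =>
  cases cs1 with
  | nil => simp at ht
  | cons b cs2 =>
  cases cs2 with
  | nil => simp at ht
  | cons c rest =>
    simp only [List.map_cons, List.cons_append, List.cons.injEq] at ht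
    obtain ⟨ha, hb, hc, -⟩ := ht
    rw [lowerChar_eq_nonletter a '#' (by decide) ha.symm,
      lowerChar_eq_nonletter b '#' (by decide) hb.symm,
      lowerChar_eq_nonletter c ' ' (by decide) hc.symm]
    exact ⟨rest, rfl⟩

-- the "## banner" test implies the section-header test
theorem banner_imp_header (l : String) (h : isBannerLine l = true) :
    isSectionHeaderA l = true := by
  unfold isBannerLine at h
  unfold isSectionHeaderA
  simp only [PySem.Str.startswith_eq, PySem.Str.toList_lower] at h ⊢
  rw [banner_chars _ h]
  simp

-- _skip_banner_content skips exactly the non-header lines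
theorem skipBannerA_drop (lines : List String) (j : Nat) (hj : 1 ≤ j) :
    lines.drop (skipBannerA lines j + 1) =
      (lines.drop j).dropWhile (fun x => !isSectionHeaderA x) := by
  unfold skipBannerA
  split
  · rename_i h
    rw [List.drop_eq_getElem_cons h]
    split
    · rename_i hhdr
      have hdw : List.dropWhile (fun x => !isSectionHeaderA x) (lines[j] :: lines.drop (j + 1)) =
          lines[j] :: lines.drop (j + 1) := by
        rw [List.dropWhile_cons]
        simp [hhdr]
      rw [hdw]
      have hj1 : j - 1 + 1 = j := by omega
      rw [hj1, List.drop_eq_getElem_cons h]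
    · rename_i hhdr
      have hdw : List.dropWhile (fun x => !isSectionHeaderA x) (lines[j] :: lines.drop (j + 1)) =
          List.dropWhile (fun x => !isSectionHeaderA x) (lines.drop (j + 1)) := by
        rw [List.dropWhile_cons]
        simp [hhdr]
      rw [hdw]
      exact skipBannerA_drop lines (j + 1) (by omega)
  · rename_i h
    rw [List.drop_eq_nil_of_le (by omega), List.drop_eq_nil_of_le (by omega)]
    simp
termination_by lines.length - j

-- the index walk of A computes goL on the remaining suffix
theorem loopA_eq_goL (lines : List String) (intro : String) (i : Nat)
    (acc : List String) (bf : Bool) :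
    loopA lines intro i acc bf =
      (acc ++ (goL intro (lines.drop i)).1, bf || (goL intro (lines.drop i)).2) := by
  unfold loopA
  split
  · rename_i h
    rw [List.drop_eq_getElem_cons h]
    by_cases hb : PySem.Str.startswith (PySem.Str.lower (PySem.Str.strip lines[i])) "## banner" = true
    · rw [if_pos hb]
      rw [loopA_eq_goL lines intro (skipBannerA lines (i + 1) + 1)]
      rw [skipBannerA_drop lines (i + 1) (by omega)]
      rw [goL_cons_banner intro lines[i] (lines.drop (i + 1)) hb]
      simp
    · rw [if_neg hb]
      rw [loopA_eq_goL lines intro (i + 1)]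
      rw [goL_cons_not intro lines[i] (lines.drop (i + 1))
        (show isBannerLine lines[i] = false by
          unfold isBannerLine; simpa using hb)]
      simp
  · rename_i h
    rw [List.drop_eq_nil_of_le (by omega)]
    simp [goL_nil]
termination_by lines.length - i
decreasing_by
  · have := skipBannerA_ge lines (i + 1); omega
  · omega

theorem splitStepB_pos (st : List (List String) × List String) (l : String)
    (h : isSectionHeaderA l = true) : splitStepB st l = (st.1 ++ [st.2], [l]) := by
  unfold splitStepB
  rw [show sectionStartB l = isSectionHeaderA l from rfl, h]
  simp

theorem splitStepB_neg (st : List (List String) × List String) (l : String)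
    (h : isSectionHeaderA l = false) : splitStepB st l = (st.1, st.2 ++ [l]) := by
  unfold splitStepB
  rw [show sectionStartB l = isSectionHeaderA l from rfl, h]
  simp

-- B's partitioning fold builds splitRecB
theorem foldl_splitStepB (xs : List String) (secs : List (List String)) (cur : List String) :
    (xs.foldl splitStepB (secs, cur)).1 ++ [(xs.foldl splitStepB (secs, cur)).2] =
      secs ++ splitRecB cur xs := by
  induction xs generalizing secs cur with
  | nil => simp [splitRecB]
  | cons l rest ih =>
    rw [List.foldl_cons]
    unfold splitRecB
    by_cases h : isSectionHeaderA l = true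
    · rw [splitStepB_pos _ _ h, if_pos h, ih]
      simp
    · rw [splitStepB_neg _ _ (by simpa using h), if_neg h, ih]

-- B's transforming fold is a flatMap plus an any
theorem foldl_procStepB (block : List String) (secs : List (List String))
    (bf : Bool) (acc : List String) :
    secs.foldl (procStepB block) (bf, acc) =
      (bf || secs.any isBannerSecB,
       acc ++ secs.flatMap (fun sec => if isBannerSecB sec then block else sec)) := by
  induction secs generalizing bf acc with
  | nil => simp
  | cons sec rest ih =>
    rw [List.foldl_cons]
    by_cases h : isBannerSecB sec = true
    · rw [show procStepB block (bf, acc) sec = (true, acc ++ block) from by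
        unfold procStepB; rw [if_pos h]]
      rw [ih]
      simp [h]
    · rw [show procStepB block (bf, acc) sec = (bf, acc ++ sec) from by
        unfold procStepB; rw [if_neg h]]
      rw [ih]
      simp [h]

theorem isBannerSecB_append (cur : List String) (l : String) (hl : isSectionHeaderA l = false) :
    isBannerSecB (cur ++ [l]) = isBannerSecB cur := by
  cases cur with
  | nil =>
    have hb : isBannerLine l = false := by
      by_contra hb'
      simp only [Bool.not_eq_false] at hb'
      rw [banner_imp_header l hb'] at hl
      exact absurd hl (by simp)
    simpa [isBannerSecB, isBannerLine] using hb
  | cons a t => simp [isBannerSecB]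

-- the central lemma: processing the sections of splitRecB equals the reference scan goL
theorem proc_splitRecB (intro : String) (xs : List String) (cur : List String) :
    ((splitRecB cur xs).flatMap
        (fun sec => if isBannerSecB sec then ["## Banner", "", intro, ""] else sec),
      (splitRecB cur xs).any isBannerSecB) =
      (if isBannerSecB cur then
        (["## Banner", "", intro, ""] ++
          (goL intro (xs.dropWhile (fun x => !isSectionHeaderA x))).1, true)
      else (cur ++ (goL intro xs).1, (goL intro xs).2)) := by
  induction xs generalizing cur with
  | nil =>
    unfold splitRecB
    by_cases h : isBannerSecB cur = true
    · simp [h, goL_nil]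
    · simp [h, goL_nil]
  | cons l rest ih =>
    unfold splitRecB
    by_cases hh : isSectionHeaderA l = true
    · rw [if_pos hh]
      have hsec : isBannerSecB [l] = isBannerLine l := rfl
      have hrec := ih [l]
      rw [hsec] at hrec
      by_cases hb : isBannerLine l = true
      · rw [if_pos hb] at hrec
        have h1 := congrArg Prod.fst hrec
        have h2 := congrArg Prod.snd hrec
        simp only at h1 h2
        by_cases hc : isBannerSecB cur = true
        · rw [if_pos hc]
          simp only [List.flatMap_cons, List.any_cons, hc, Bool.true_or]
          rw [show List.dropWhile (fun x => !isSectionHeaderA x) (l :: rest) = l :: rest from by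
            rw [List.dropWhile_cons]; simp [hh]]
          rw [goL_cons_banner intro l rest hb]
          simp [h1]
        · rw [if_neg hc]
          simp only [List.flatMap_cons, List.any_cons, if_neg hc]
          rw [goL_cons_banner intro l rest hb]
          simp [h1, h2, hc]
      · have hb' : isBannerLine l = false := by simpa using hb
        rw [if_neg hb] at hrec
        have h1 := congrArg Prod.fst hrec
        have h2 := congrArg Prod.snd hrec
        simp only at h1 h2
        by_cases hc : isBannerSecB cur = true
        · rw [if_pos hc]
          simp only [List.flatMap_cons, List.any_cons, hc, Bool.true_or]
          rw [show List.dropWhile (fun x => !isSectionHeaderA x) (l :: rest) = l :: rest from by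
            rw [List.dropWhile_cons]; simp [hh]]
          rw [goL_cons_not intro l rest hb']
          simp [h1]
        · rw [if_neg hc]
          simp only [List.flatMap_cons, List.any_cons, if_neg hc]
          rw [goL_cons_not intro l rest hb']
          simp [h1, h2, hc]
    · rw [if_neg hh]
      have hb : isBannerLine l = false := by
        by_contra hb'
        simp only [Bool.not_eq_false] at hb'
        rw [banner_imp_header l hb'] at hh
        exact hh rfl
      rw [ih (cur ++ [l])]
      rw [isBannerSecB_append cur l (by simpa using hh)]
      by_cases hc : isBannerSecB cur = true
      · rw [if_pos hc, if_pos hc]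
        rw [show List.dropWhile (fun x => !isSectionHeaderA x) (l :: rest) =
            List.dropWhile (fun x => !isSectionHeaderA x) rest from by
          rw [List.dropWhile_cons]; simp [hh]]
      · rw [if_neg hc, if_neg hc]
        rw [goL_cons_not intro l rest hb]
        simp

-- ===== VERDICT (by name: the statement is the Claim_ definition above) =====
theorem update_banner_in_raw_personal_py_spec : Claim_equal_update_banner_in_raw_personal_py := by
  intro raw_personal introduction _
  unfold Spec_update_banner_in_raw_personal_py
  unfold update_banner_in_raw_personal_py update_banner_in_raw_personal_py_alt
  cases introduction with
  | none => rfl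
  | some intro =>
    by_cases h0 : (intro = "" || PySem.Str.strip intro = "") = true
    · simp only [h0, if_true]
    · simp only [h0]
      have hA := loopA_eq_goL (PySem.Str.splitlines raw_personal) (PySem.Str.strip intro) 0 [] false
      simp only [List.drop_zero, List.nil_append, Bool.false_or] at hA
      have hB1 := foldl_splitStepB (PySem.Str.splitlines raw_personal) [] []
      simp only [List.nil_append] at hB1
      have hB2 := foldl_procStepB ["## Banner", "", PySem.Str.strip intro, ""]
        (splitRecB [] (PySem.Str.splitlines raw_personal)) false []
      have hG := proc_splitRecB (PySem.Str.strip intro) (PySem.Str.splitlines raw_personal) []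
      rw [if_neg (by simp [isBannerSecB])] at hG
      simp only [List.nil_append] at hG
      have hG1 := congrArg Prod.fst hG
      have hG2 := congrArg Prod.snd hG
      simp only at hG1 hG2
      rw [hG1, hG2] at hB2
      simp only [Bool.false_or, List.nil_append] at hB2
      rw [hA]
      conv_rhs =>
        rw [show ((PySem.Str.splitlines raw_personal).foldl splitStepB ([], [])).1 ++
            [((PySem.Str.splitlines raw_personal).foldl splitStepB ([], [])).2] =
            splitRecB [] (PySem.Str.splitlines raw_personal) from hB1]
        rw [hB2]
      unfold rebuildA
      rfl
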